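-- pv_equiv track=rewrite | github.com/chorogrim/verde | programmers/탐욕법_조이스틱.py | solution
-- ===== SOURCE A (Python) =====
-- def solution(name):
--     count = 0 # 문자열을 완성하기 위해 상하 방향키로 조작하는 횟수를 누적
--     size = len(name) # 입력된 문자열의 길이를 나타내는 변수
--     min_move = size - 1 # 좌우 방향키로 이동할 때의 최소 이동 횟수를 초기화
--
--     for idx, char in enumerate(name): # 문자열 name의 각 문자에 대해 반복
--         count += min(ord(char) - ord('A'), ord('Z') - ord(char) + 1) # 현재 문자를 완성하기 위해 상하 방향키로 조작하는 횟수를 계산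
--
--         next_idx = idx + 1 # 다음 인덱스를 설정
--         while next_idx < size and name[next_idx] == 'A': # 연속된 A를 만나면 다음 문자로 이동
--             next_idx += 1
--
--         min_move = min([min_move, 2 * idx + size - next_idx, idx + 2 * (size - next_idx)]) # 좌우 방향키로 이동할 때의 최소 이동 횟수를 계산
--
--     count += min_move # 상하 방향키 조작 횟수와 좌우 이동 횟수를 합하여 최종 결과를 반환
--     return count # 함수의 결과를 반환
-- ===== SOURCE B (Python) =====
-- def solution(name):
--     size = len(name)
--     count = 0
--     min_move = size - 1
--     nextnon = size  # index of first non-'A' char strictly after the current position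
--     for idx in range(size - 1, -1, -1):  # one backward pass, no inner scan
--         c = ord(name[idx])
--         count += min(c - 65, 91 - c)
--         min_move = min(min_move, 2 * idx + size - nextnon, idx + 2 * (size - nextnon))
--         if c != 65:
--             nextnon = idx
--     return count + min_move
-- ===== Notes on version B (the rewrite author's own statement) =====
-- stated objective: faster
-- what changed: Replaced the forward loop with an inner while-scan over runs of 'A' by a single backward pass that threads the next-non-'A' index as loop state, removing the inner scan entirely.
import Mathlib
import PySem

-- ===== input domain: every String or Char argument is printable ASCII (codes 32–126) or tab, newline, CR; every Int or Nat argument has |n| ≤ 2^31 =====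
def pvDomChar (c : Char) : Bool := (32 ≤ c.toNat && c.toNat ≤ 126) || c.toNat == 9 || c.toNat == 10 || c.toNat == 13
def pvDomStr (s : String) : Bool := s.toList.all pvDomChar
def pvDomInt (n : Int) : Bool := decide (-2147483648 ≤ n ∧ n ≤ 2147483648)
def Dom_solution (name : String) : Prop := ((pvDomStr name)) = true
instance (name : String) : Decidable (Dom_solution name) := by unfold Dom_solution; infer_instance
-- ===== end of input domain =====

-- B replaces A's forward loop with an inner while-scan over runs of 'A' by one backward pass
-- threading the next-non-'A' index as loop state (objective: faster, O(n) vs O(n^2)).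

-- ===== PORT A =====

-- the inner `while next_idx < size and name[next_idx] == 'A'` loop
def whileA (full : List Char) (size j : Int) : Int :=
  if h : j < size ∧ PySem.List.pyGet? full j = some 'A' then
    whileA full size (j + 1)
  else j
termination_by (size - j).toNat
decreasing_by omega

-- the `for idx, char in enumerate(name)` loop, carrying count and min_move
def loopA (full : List Char) (size : Int) : List Char → Int → Int → Int → Int
  | [], _, count, min_move => count + min_move
  | c :: rest, idx, count, min_move =>
      let count := count + min ((c.toNat : Int) - 65) (90 - (c.toNat : Int) + 1)
      let next_idx := whileA full size (idx + 1)
      loopA full size rest (idx + 1) count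
        (min min_move (min (2 * idx + size - next_idx) (idx + 2 * (size - next_idx))))

def solution (name : String) : Int :=
  let cs := name.toList
  let size : Int := cs.length
  loopA cs size cs 0 0 (size - 1)

-- ===== PORT B =====

-- Source B's backward `for idx in range(size-1, -1, -1)` loop: the recursive call first
-- processes the suffix (larger indices), returning (count, min_move, nextnon)
def loopB (size : Int) : List Char → Int → Int × Int × Int
  | [], _ => (0, size - 1, size)
  | c :: rest, idx =>
      let (count, min_move, nextnon) := loopB size rest (idx + 1)
      let count := count + min ((c.toNat : Int) - 65) (91 - (c.toNat : Int))
      let min_move := min min_move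
        (min (2 * idx + size - nextnon) (idx + 2 * (size - nextnon)))
      let nextnon := if (c.toNat : Int) ≠ 65 then idx else nextnon
      (count, min_move, nextnon)

def solution_alt (name : String) : Int :=
  let cs := name.toList
  let size : Int := cs.length
  let (count, min_move, _) := loopB size cs 0
  count + min_move

-- ===== PRECONDITION & SPEC =====
def Spec_solution (name : String) (out : Int) : Prop := out = solution_alt name
instance (name : String) (out : Int) : Decidable (Spec_solution name out) := by unfold Spec_solution; infer_instance

-- ===== CLAIM (what is proved, stated in full; the proofs are below) =====
def Claim_equal_solution : Prop := ∀ (name : String), Dom_solution name → Spec_solution name (solution name)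

-- ===== LEMMAS AND PROOFS =====

-- reference functions: per-character key cost, first non-'A' index in a suffix, min over candidates
def sumC : List Char → Int
  | [] => 0
  | c :: rest => min ((c.toNat : Int) - 65) (91 - (c.toNat : Int)) + sumC rest

def firstNonA (size : Int) : List Char → Int → Int
  | [], _ => size
  | c :: rest, i => if (c.toNat : Int) ≠ 65 then i else firstNonA size rest (i + 1)

def minCands (size : Int) : List Char → Int → Int
  | [], _ => size - 1
  | _ :: rest, i =>
      let n := firstNonA size rest (i + 1)
      min (minCands size rest (i + 1)) (min (2 * i + size - n) (i + 2 * (size - n)))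

-- forward accumulation of the same candidates, as loopA performs it
def minA (size : Int) : List Char → Int → Int → Int
  | [], _, m => m
  | _ :: rest, i, m =>
      let n := firstNonA size rest (i + 1)
      minA size rest (i + 1) (min m (min (2 * i + size - n) (i + 2 * (size - n))))

theorem loopB_eq (size : Int) (cs : List Char) (i : Int) :
    loopB size cs i = (sumC cs, minCands size cs i, firstNonA size cs i) := by
  induction cs generalizing i with
  | nil => simp [loopB, sumC, minCands, firstNonA]
  | cons c rest ih =>
      simp only [loopB, ih, sumC, minCands, firstNonA, Prod.mk.injEq]
      exact ⟨by ring, trivial⟩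

theorem whileA_eq (full : List Char) (j : Int) (h0 : 0 ≤ j)
    (l : List Char) (hd : full.drop j.toNat = l) (hj : j ≤ (full.length : Int)) :
    whileA full (full.length : Int) j = firstNonA (full.length : Int) l j := by
  induction l generalizing j with
  | nil =>
      rw [whileA]
      have hlen : full.length ≤ j.toNat := by
        by_contra hc
        push Not at hc
        have := List.drop_eq_nil_iff.mp hd
        omega
      have : ¬ (j < (full.length : Int) ∧ PySem.List.pyGet? full j = some 'A') := by
        rintro ⟨h1, _⟩; omega
      rw [dif_neg this]
      simp [firstNonA]
      omega
  | cons c t ih =>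
      have hlt : j.toNat < full.length := by
        by_contra hc
        push Not at hc
        have : full.drop j.toNat = [] := List.drop_eq_nil_iff.mpr hc
        rw [this] at hd; exact (List.cons_ne_nil _ _) hd.symm
      have hget : PySem.List.pyGet? full j = some c := by
        rw [PySem.List.pyGet?_of_nonneg full h0]
        have : full[j.toNat]? = (full.drop j.toNat)[0]? := by
          simp [List.getElem?_drop]
        rw [this, hd]
        simp
      rw [whileA]
      by_cases hA : c = 'A'
      · have hcond : j < (full.length : Int) ∧ PySem.List.pyGet? full j = some 'A' := by
          refine ⟨by omega, by rw [hget, hA]⟩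
        rw [dif_pos hcond]
        have hd' : full.drop (j + 1).toNat = t := by
          have : (j + 1).toNat = j.toNat + 1 := by omega
          rw [this, ← List.drop_drop, hd]
          simp
        have := ih (j + 1) (by omega) hd' (by omega)
        rw [this]
        simp [firstNonA, hA]
      · have hcond : ¬ (j < (full.length : Int) ∧ PySem.List.pyGet? full j = some 'A') := by
          rintro ⟨_, hg⟩
          rw [hget] at hg
          exact hA (Option.some.injEq _ _ ▸ hg)
        rw [dif_neg hcond]
        have hne : (c.toNat : Int) ≠ 65 := by
          intro h
          apply hA
          have h65 : c.toNat = 65 := by exact_mod_cast h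
          have hv : c.val = 'A'.val := by
            have : c.val.toNat = 65 := h65
            exact UInt32.toNat_inj.mp (by simp [this])
          exact Char.ext hv
        simp [firstNonA, hne]

theorem loopA_eq (full : List Char) (rest : List Char) (pre : List Char)
    (hfull : full = pre ++ rest) (count mm : Int) :
    loopA full (full.length : Int) rest (pre.length : Int) count mm
      = count + sumC rest + minA (full.length : Int) rest (pre.length : Int) mm := by
  induction rest generalizing pre count mm with
  | nil => simp [loopA, sumC, minA]
  | cons c t ih =>
      have hdrop : full.drop ((pre.length : Int) + 1).toNat = t := by
        have h1 : ((pre.length : Int) + 1).toNat = pre.length + 1 := by omega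
        rw [h1, hfull]
        rw [show pre ++ c :: t = (pre ++ [c]) ++ t by simp]
        rw [List.drop_left' (by simp)]
      have hw : whileA full (full.length : Int) ((pre.length : Int) + 1)
          = firstNonA (full.length : Int) t ((pre.length : Int) + 1) := by
        apply whileA_eq full _ (by omega) t hdrop
        have : pre.length + 1 ≤ full.length := by
          rw [hfull]; simp
        omega
      simp only [loopA, hw]
      have := ih (pre ++ [c]) (by simp [hfull])
        (count + min ((c.toNat : Int) - 65) (90 - (c.toNat : Int) + 1))
        (min mm (min (2 * (pre.length : Int) + (full.length : Int)
            - firstNonA (full.length : Int) t ((pre.length : Int) + 1))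
          ((pre.length : Int) + 2 * ((full.length : Int)
            - firstNonA (full.length : Int) t ((pre.length : Int) + 1)))))
      simp only [List.length_append, List.length_cons, List.length_nil] at this ⊢
      push_cast at this ⊢
      rw [this]
      simp only [sumC, minA]
      ring_nf

theorem minA_min (size : Int) (cs : List Char) (i a b : Int) :
    minA size cs i (min a b) = min a (minA size cs i b) := by
  induction cs generalizing i a b with
  | nil => simp [minA]
  | cons c t ih =>
      simp only [minA]
      rw [min_assoc, ih]

theorem minCands_le (size : Int) (cs : List Char) (i : Int) :
    minCands size cs i ≤ size - 1 := by
  induction cs generalizing i with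
  | nil => simp [minCands]
  | cons c t ih =>
      simp only [minCands]
      exact le_trans (min_le_left _ _) (ih _)

theorem minA_eq_minCands (size : Int) (cs : List Char) (i : Int) :
    minA size cs i (size - 1) = minCands size cs i := by
  induction cs generalizing i with
  | nil => simp [minA, minCands]
  | cons c t ih =>
      simp only [minA, minCands]
      rw [min_comm (size - 1) _, minA_min, ih]
      have := minCands_le size t (i + 1)
      omega

-- ===== VERDICT (by name: the statement is the Claim_ definition above) =====
theorem solution_spec : Claim_equal_solution := by
  intro name _
  unfold Spec_solution solution solution_alt
  simp only
  rw [loopB_eq]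
  have h := loopA_eq name.toList name.toList [] (by simp) 0 ((name.toList.length : Int) - 1)
  simp only [List.length_nil, Nat.cast_zero] at h
  rw [h]
  have h2 := minA_eq_minCands (name.toList.length : Int) name.toList 0
  rw [h2]
  ring
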